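-- pv_equiv track=rewrite | github.com/AlexPTerry/AdventOfCode2024 | day15/part2.py | box_move_left
-- ===== SOURCE A (Python) =====
-- def box_move_left(box, boxes, walls, moving_boxes):
--     target = box - 2
--     if target in walls:
--         return False
--     if target in boxes:
--         if not box_move_left(target, boxes, walls, moving_boxes):
--             return False
--     moving_boxes.add(box)
--     return True
-- ===== SOURCE B (Python) =====
-- def box_move_left(box, boxes, walls, moving_boxes):
--     # Iterative version: walk the leftward chain, buffer it, commit only on success.
--     chain = []
--     current = box
--     while True:
--         chain.append(current)
--         target = current - 2
--         if target in walls: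
--             return False
--         if target in boxes:
--             current = target
--         else:
--             break
--     moving_boxes.update(chain)
--     return True
-- ===== Notes on version B (the rewrite author's own statement) =====
-- stated objective: alternative
-- what changed: Replaces the recursive chain check with an explicit while-loop that walks the leftward chain, buffering the boxes in a local list and committing them to moving_boxes only once the whole chain is known to be free.
import Mathlib
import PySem

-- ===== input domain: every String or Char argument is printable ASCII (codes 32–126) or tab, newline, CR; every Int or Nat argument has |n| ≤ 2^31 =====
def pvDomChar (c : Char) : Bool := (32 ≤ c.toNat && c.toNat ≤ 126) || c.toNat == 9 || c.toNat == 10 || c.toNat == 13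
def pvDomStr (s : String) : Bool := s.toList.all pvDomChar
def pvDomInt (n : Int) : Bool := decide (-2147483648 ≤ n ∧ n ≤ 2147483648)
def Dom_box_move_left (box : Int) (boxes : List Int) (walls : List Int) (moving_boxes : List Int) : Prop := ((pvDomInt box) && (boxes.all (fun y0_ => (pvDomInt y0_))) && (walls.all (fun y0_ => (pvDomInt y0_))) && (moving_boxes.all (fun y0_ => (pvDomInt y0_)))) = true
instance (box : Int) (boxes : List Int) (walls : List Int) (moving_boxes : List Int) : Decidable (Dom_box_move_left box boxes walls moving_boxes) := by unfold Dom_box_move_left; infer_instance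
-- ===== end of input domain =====

-- B replaces A's recursion with an explicit while-loop that buffers the chain; booleans
-- are equivalent and the (caller-observable) mutation of moving_boxes is the same set update,
-- committed only on success — the equivalence proved here is about the RETURN value only.
-- termination measure lemma for port A (cited by its decreasing_by)
theorem bml_measure_lt (boxes : List Int) (x : Int) (h : (x - 2) ∈ boxes) :
    (boxes.filter (fun b => decide (b ≤ x - 2 - 2))).length <
    (boxes.filter (fun b => decide (b ≤ x - 2))).length := by
  induction boxes with
  | nil => cases h
  | cons a t ih =>
    have hmt : (t.filter (fun b => decide (b ≤ x - 2 - 2))).length ≤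
        (t.filter (fun b => decide (b ≤ x - 2))).length := by
      rw [← List.countP_eq_length_filter, ← List.countP_eq_length_filter]
      exact List.countP_mono_left (fun b _ hb => by simp at hb ⊢; omega)
    simp only [List.filter_cons]
    rcases List.mem_cons.mp h with h1 | h2
    · split_ifs with hA hB hB <;>
        simp_all only [decide_eq_true_eq, List.length_cons] <;> omega
    · have ht := ih h2
      split_ifs with hA hB hB <;>
        simp_all only [decide_eq_true_eq, List.length_cons] <;> omega

-- ===== PORT A =====
-- A recurses on box-2 while box-2 ∈ boxes; termination measure: number of boxes ≤ box-2.
def box_move_left (box : Int) (boxes : List Int) (walls : List Int) (moving_boxes : List Int) : Bool :=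
  let target := box - 2
  if target ∈ walls then false
  else if target ∈ boxes then
    if !(box_move_left target boxes walls moving_boxes) then false
    else true
  else true
termination_by (boxes.filter (fun b => decide (b ≤ box - 2))).length
decreasing_by
  exact bml_measure_lt boxes box (by assumption)

-- ===== PORT B =====
-- the while-loop of Source B, ported with fuel; boxes.length + 1 iterations always suffice
-- (each iteration after the first consumes a distinct, strictly smaller element of boxes).
def bmlLoop (boxes : List Int) (walls : List Int) : Nat → Int → Bool
  | 0, _ => true
  | fuel + 1, current =>
    let target := current - 2
    if target ∈ walls then false
    else if target ∈ boxes then bmlLoop boxes walls fuel target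
    else true

def box_move_left_alt (box : Int) (boxes : List Int) (walls : List Int) (moving_boxes : List Int) : Bool :=
  bmlLoop boxes walls (boxes.length + 1) box

-- ===== PRECONDITION & SPEC =====
def Spec_box_move_left (box : Int) (boxes : List Int) (walls : List Int) (moving_boxes : List Int) (out : Bool) : Prop := out = box_move_left_alt box boxes walls moving_boxes
instance (box : Int) (boxes : List Int) (walls : List Int) (moving_boxes : List Int) (out : Bool) : Decidable (Spec_box_move_left box boxes walls moving_boxes out) := by unfold Spec_box_move_left; infer_instance

-- ===== CLAIM (what is proved, stated in full; the proofs are below) =====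
def Claim_equal_box_move_left : Prop := ∀ (box : Int) (boxes : List Int) (walls : List Int) (moving_boxes : List Int), Dom_box_move_left box boxes walls moving_boxes → Spec_box_move_left box boxes walls moving_boxes (box_move_left box boxes walls moving_boxes)

-- ===== LEMMAS AND PROOFS =====

-- the loop computes A's recursion whenever the fuel exceeds A's termination measure
theorem bmlLoop_eq (boxes walls moving_boxes : List Int) :
    ∀ (fuel : Nat) (box : Int),
      (boxes.filter (fun b => decide (b ≤ box - 2))).length < fuel →
      bmlLoop boxes walls fuel box = box_move_left box boxes walls moving_boxes := by
  intro fuel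
  induction fuel with
  | zero => intro box h; omega
  | succ n ih =>
    intro box h
    rw [box_move_left, bmlLoop]
    by_cases hw : (box - 2) ∈ walls
    · simp [hw]
    · by_cases hb : (box - 2) ∈ boxes
      · have hlt := bml_measure_lt boxes box hb
        have := ih (box - 2) (by omega)
        simp only [hw, hb, if_true, if_false, this]
        cases box_move_left (box - 2) boxes walls moving_boxes <;> simp
      · simp [hw, hb]

-- ===== VERDICT (by name: the statement is the Claim_ definition above) =====
theorem box_move_left_spec : Claim_equal_box_move_left := by
  intro box boxes walls moving_boxes _
  unfold Spec_box_move_left box_move_left_alt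
  refine (bmlLoop_eq boxes walls moving_boxes _ box ?_).symm
  have : (boxes.filter (fun b => decide (b ≤ box - 2))).length ≤ boxes.length :=
    List.length_filter_le _ _
  omega
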